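-- pv_equiv track=rewrite | github.com/graphsandstuff/Graph | Ed.py | ed5
-- ===== SOURCE A (Python) =====
-- import itertools
--
-- def idx(n):
--     "Creates identity matrix size n by n"
--     x=[]
--     for i in range(n):
--         x.append([])
--         for j in range(n):
--             if i==j:
--                 x[i].append(1)
--             else:
--                 x[i].append(0)
--     return x
--
-- def matxadd(x,y):
--     "Adds two matrices together"
--     xy=idx(len(x))
--     for i in range(len(x)):
--         if type(x[i])!=list:
--             xy[i]=(x[i]+y[i])%2
--         else:
--             for j in range(len(x[i])):
--                 xy[i][j]=(x[i][j]+y[i][j])%2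
--     return xy
--
-- def coladd(x,y):
--     "Adds two vectors together"
--     xy=[]
--     for i in range(len(x)):
--         xy.append((x[i]+y[i])%2)
--     return xy
--
-- def repeat(D):
--     "Checks if there no repeats"
--     for i in range(len(D)):
--         for j in range(len(D)):
--             if i!=j and D[i]==D[j]:
--                 return False
--     return True
--
-- def colsadd(D):
--     Y=D[0]
--     if len(D)==1:
--         return D
--     for i in range(len(D)-1):
--         Y=coladd(Y,D[i+1])
--     return Y
--
-- def ed5(G,x,y):
--     Z=coladd(x,y)
--     X=G+idx(len(G))+matxadd(G,idx(len(G)))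
--     for x1,x2,x3,x4,x5 in itertools.product(X,X,X,X,X):
--         D=[x1,x2,x3,x4,x5]
--         if repeat(D)==True:
--             if colsadd(D)==Z:
--                 return D
-- ===== SOURCE B (Python) =====
-- def ed5(G, x, y):
--     n = len(G)
--     Z = [(a + b) % 2 for a, b in zip(x, y)]
--     I = [[1 if i == j else 0 for j in range(n)] for i in range(n)]
--     GI = [[(a + b) % 2 for a, b in zip(r, e)] for r, e in zip(G, I)]
--     X = G + I + GI
--     red = [[v % 2 for v in r] for r in X]
--     buckets = {}
--     for t, r in zip(red, X):
--         buckets.setdefault(tuple(t), []).append(r)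
--     if len(Z) != n:
--         return None  # every candidate row has length n, so no sum can equal Z
--     P = list(zip(X, red))
--     for x1, r1 in P:
--         t1 = [(a + b) % 2 for a, b in zip(Z, r1)]
--         for x2, r2 in P:
--             if x2 == x1:
--                 continue
--             t2 = [(a + b) % 2 for a, b in zip(t1, r2)]
--             for x3, r3 in P:
--                 if x3 == x1 or x3 == x2:
--                     continue
--                 t3 = [(a + b) % 2 for a, b in zip(t2, r3)]
--                 for x4, r4 in P:
--                     if x4 == x1 or x4 == x2 or x4 == x3:
--                         continue
--                     t4 = [(a + b) % 2 for a, b in zip(t3, r4)]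
--                     for x5 in buckets.get(tuple(t4), ()):
--                         if x5 != x1 and x5 != x2 and x5 != x3 and x5 != x4:
--                             return [x1, x2, x3, x4, x5]
--     return None
-- ===== Notes on version B (the rewrite author's own statement) =====
-- stated objective: faster
-- what changed: B enumerates only quadruples (pruning duplicate prefixes early) and obtains the forced fifth row by a hash index from mod-2 reduction to rows, instead of A's five nested loops with a full repeat/colsadd test per quintuple.
import Mathlib
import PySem

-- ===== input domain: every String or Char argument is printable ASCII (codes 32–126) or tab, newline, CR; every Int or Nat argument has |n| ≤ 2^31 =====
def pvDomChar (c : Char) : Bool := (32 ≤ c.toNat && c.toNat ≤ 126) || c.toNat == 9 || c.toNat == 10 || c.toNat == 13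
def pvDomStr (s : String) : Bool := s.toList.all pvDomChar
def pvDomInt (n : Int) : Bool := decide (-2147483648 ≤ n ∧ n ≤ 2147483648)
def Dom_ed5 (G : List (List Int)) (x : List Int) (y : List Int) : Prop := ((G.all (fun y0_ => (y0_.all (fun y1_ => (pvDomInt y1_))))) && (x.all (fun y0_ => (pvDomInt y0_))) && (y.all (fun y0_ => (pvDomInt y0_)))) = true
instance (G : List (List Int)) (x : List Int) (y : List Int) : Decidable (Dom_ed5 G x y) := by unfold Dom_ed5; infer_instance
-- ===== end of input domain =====

-- B replaces A's five nested loops over X by four (with early duplicate pruning) plus a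
-- hash index from mod-2 reduction to rows that yields the forced fifth row: objective = faster.

-- ===== PORT A =====
-- idx(n): identity matrix, built by successive appends
def idxA (n : Nat) : List (List Int) :=
  (List.range n).foldl
    (fun xr i => xr ++ [(List.range n).foldl
      (fun row j => row ++ [if i = j then (1 : Int) else 0]) []]) []

-- matxadd(x,y): the 'type(x[i])!=list' branch is unreachable here (rows are always lists)
def matxaddA (x : List (List Int)) (y : List (List Int)) : List (List Int) :=
  (List.range x.length).foldl
    (fun xy i => xy.set i
      ((List.range (x.getD i []).length).foldl
        (fun row j => row.set j
          (PySem.Int.mod ((x.getD i []).getD j 0 + (y.getD i []).getD j 0) 2))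
        (xy.getD i [])))
    (idxA x.length)

def coladdA (x : List Int) (y : List Int) : List Int :=
  (List.range x.length).foldl
    (fun xy i => xy ++ [PySem.Int.mod (x.getD i 0 + y.getD i 0) 2]) []

def repeatA (D : List (List Int)) : Bool :=
  (List.range D.length).all fun i => (List.range D.length).all fun j =>
    !(decide (i ≠ j) && (D.getD i [] == D.getD j []))

-- colsadd(D): Python returns D itself when len(D)==1; ed5 only calls it with 5 rows,
-- so that (differently typed) branch is unreachable and not ported
def colsaddA (D : List (List Int)) : List Int :=
  (List.range (D.length - 1)).foldl
    (fun Y i => coladdA Y (D.getD (i + 1) [])) (D.getD 0 [])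

def ed5 (G : List (List Int)) (x : List Int) (y : List Int) : Option (List (List Int)) :=
  let Z := coladdA x y
  let X := G ++ idxA G.length ++ matxaddA G (idxA G.length)
  X.findSome? fun x1 => X.findSome? fun x2 => X.findSome? fun x3 =>
    X.findSome? fun x4 => X.findSome? fun x5 =>
      let D := [x1, x2, x3, x4, x5]
      if repeatA D = true then (if colsaddA D = Z then some D else none) else none

-- ===== PORT B =====
def xorv (a : List Int) (b : List Int) : List Int :=
  (a.zip b).map fun p => PySem.Int.mod (p.1 + p.2) 2

def redB (r : List Int) : List Int := r.map fun v => PySem.Int.mod v 2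

def idxB (n : Nat) : List (List Int) :=
  (List.range n).map fun i => (List.range n).map fun j => if i = j then (1 : Int) else 0

def ed5_alt (G : List (List Int)) (x : List Int) (y : List Int) : Option (List (List Int)) :=
  let n := G.length
  let Z := xorv x y
  let I := idxB n
  let GI := (G.zip I).map fun p => xorv p.1 p.2
  let X := G ++ I ++ GI
  let red := X.map redB
  -- buckets.setdefault(tuple(t), []).append(r)  ≡  modify t [] (· ++ [r]); tuple keys become List Int keys
  let buckets := (red.zip X).foldl (fun d p => d.modify p.1 [] (· ++ [p.2]))
    (PySem.Dict.empty : PySem.Dict (List Int) (List (List Int)))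
  if Z.length ≠ n then none else
  let P := X.zip red
  P.findSome? fun p1 =>
    let t1 := xorv Z p1.2
    P.findSome? fun p2 =>
      if p2.1 = p1.1 then none else
      let t2 := xorv t1 p2.2
      P.findSome? fun p3 =>
        if p3.1 = p1.1 ∨ p3.1 = p2.1 then none else
        let t3 := xorv t2 p3.2
        P.findSome? fun p4 =>
          if p4.1 = p1.1 ∨ p4.1 = p2.1 ∨ p4.1 = p3.1 then none else
          let t4 := xorv t3 p4.2
          (buckets.getD t4 []).findSome? fun x5 =>
            if x5 ≠ p1.1 ∧ x5 ≠ p2.1 ∧ x5 ≠ p3.1 ∧ x5 ≠ p4.1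
            then some [p1.1, p2.1, p3.1, p4.1, x5] else none

-- ===== PRECONDITION & SPEC =====
-- Pre_ excludes (i) G with a row longer than len(G), where A raises IndexError in matxadd;
-- (ii) len(y) < len(x), where coladd(x,y) raises IndexError; and (iii) ragged G with
-- len(G) ≥ 2, where A either raises in colsadd or (rarely) returns a value that depends on
-- leftover identity-row entries of matxadd — see the cite. G of length ≤ 1 (where the loop
-- can never find 5 distinct rows) and square G are admitted.
def Pre_ed5 (G : List (List Int)) (x : List Int) (y : List Int) : Prop :=
  (∀ r ∈ G, r.length ≤ G.length) ∧ (G.length ≤ 1 ∨ ∀ r ∈ G, r.length = G.length) ∧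
    x.length ≤ y.length
instance (G : List (List Int)) (x : List Int) (y : List Int) : Decidable (Pre_ed5 G x y) := by
  unfold Pre_ed5; infer_instance

def pvWitness_ed5 : List (List Int) × List Int × List Int := ([[1, 0], [0, 1]], [1], [0, 1])

def Spec_ed5 (G : List (List Int)) (x : List Int) (y : List Int) (out : Option (List (List Int))) : Prop :=
  out = ed5_alt G x y
instance (G : List (List Int)) (x : List Int) (y : List Int) (out : Option (List (List Int))) :
    Decidable (Spec_ed5 G x y out) := by unfold Spec_ed5; infer_instance

-- ===== CLAIM (what is proved, stated in full; the proofs are below) =====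
def Claim_equal_ed5 : Prop := ∀ (G : List (List Int)) (x : List Int) (y : List Int),
  Dom_ed5 G x y → Pre_ed5 G x y → Spec_ed5 G x y (ed5 G x y)

-- ===== LEMMAS AND PROOFS =====

theorem pvXorvLen (a b : List Int) : (xorv a b).length = min a.length b.length := by
  simp [xorv]

theorem pvXorvCons (x y : Int) (a b : List Int) :
    xorv (x :: a) (y :: b) = PySem.Int.mod (x + y) 2 :: xorv a b := by simp [xorv]

theorem pvXorvComm (a : List Int) : ∀ b, xorv a b = xorv b a := by
  induction a with
  | nil =>
    intro b; cases b <;> simp [xorv]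
  | cons x a ih =>
    intro b
    cases b with
    | nil => simp [xorv]
    | cons y b =>
      simp only [pvXorvCons, ih]
      simp; ring_nf

theorem pvXorvAssoc (a : List Int) : ∀ b c, xorv (xorv a b) c = xorv a (xorv b c) := by
  induction a with
  | nil =>
    intro b c; simp [xorv]
  | cons x a ih =>
    intro b c
    cases b with
    | nil => simp [xorv]
    | cons y b =>
      cases c with
      | nil => simp [xorv]
      | cons z c =>
        simp only [pvXorvCons, ih]
        simp; omega

theorem pvXorvRedL (a : List Int) : ∀ b, xorv (redB a) b = xorv a b := by
  induction a with
  | nil =>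
    intro b; simp [redB]
  | cons x a ih =>
    intro b
    cases b with
    | nil => simp [xorv]
    | cons y b =>
      simp only [redB, List.map_cons] at *
      simp only [pvXorvCons, ih]
      simp

theorem pvXorvRedR (a b : List Int) : xorv a (redB b) = xorv a b := by
  rw [pvXorvComm, pvXorvRedL, pvXorvComm]

theorem pvRedXorv (a : List Int) : ∀ b, redB (xorv a b) = xorv a b := by
  induction a with
  | nil =>
    intro b; simp [xorv, redB]
  | cons x a ih =>
    intro b
    cases b with
    | nil => simp [xorv, redB]
    | cons y b =>
      simp only [pvXorvCons, redB, List.map_cons] at *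
      simp only [ih]
      simp

theorem pvCancel (a : List Int) : ∀ b, a.length = b.length → xorv a (xorv a b) = redB b := by
  induction a with
  | nil =>
    intro b h
    cases b with
    | nil => simp [xorv, redB]
    | cons y b => simp at h
  | cons x a ih =>
    intro b h
    cases b with
    | nil => simp at h
    | cons y b =>
      simp only [pvXorvCons, redB, List.map_cons]
      have ht := ih b (by simpa using h)
      simp only [redB] at ht
      simp only [ht]
      simp; omega

theorem pvFoldlPush {α β : Type} (f : β → α) :
    ∀ (l : List β) (acc : List α), l.foldl (fun r b => r ++ [f b]) acc = acc ++ l.map f := by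
  intro l
  induction l with
  | nil => intro acc; simp
  | cons b t ih => intro acc; simp [ih]

theorem pvIdxEq (n : Nat) : idxA n = idxB n := by
  unfold idxA idxB
  simp only [pvFoldlPush, List.nil_append]

theorem pvColaddEq (x y : List Int) (h : x.length ≤ y.length) : coladdA x y = xorv x y := by
  unfold coladdA xorv
  rw [pvFoldlPush]
  apply List.ext_getElem
  · simp; omega
  · intro i h1 h2
    simp only [List.nil_append, List.getElem_map, List.getElem_range, List.getElem_zip]
    simp only [List.nil_append, List.length_map, List.length_range] at h1
    rw [List.getD_eq_getElem x 0 h1, List.getD_eq_getElem y 0 (by omega)]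

theorem pvFoldlSetConst {α : Type} (g : Nat → α) (d : α) (l : List α) :
    ∀ k, k ≤ l.length →
      (List.range k).foldl (fun r j => r.set j (g j)) l
      = (List.range l.length).map (fun i => if i < k then g i else l.getD i d) := by
  intro k
  induction k with
  | zero =>
    intro _
    apply List.ext_getElem
    · simp
    · intro i h1 h2
      simp only [List.range_zero, List.foldl_nil] at h1 ⊢
      simp only [List.getElem_map, List.getElem_range, if_neg (Nat.not_lt_zero _)]
      rw [List.getD_eq_getElem l d (by simpa using h1)]
  | succ k ih =>
    intro hk
    rw [List.range_succ, List.foldl_append, ih (by omega)]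
    simp only [List.foldl_cons, List.foldl_nil]
    apply List.ext_getElem
    · simp
    · intro i h1 h2
      simp only [List.length_set, List.length_map, List.length_range] at h1 h2
      rw [List.getElem_set]
      simp only [List.getElem_map, List.getElem_range]
      by_cases hik : k = i
      · subst hik
        simp
      · simp only [if_neg hik]
        split_ifs <;> first | rfl | omega

theorem pvIdxBRow (n i : Nat) (h : i < n) :
    (idxB n).getD i [] = (List.range n).map (fun j => if i = j then (1 : Int) else 0) := by
  unfold idxB
  rw [List.getD_eq_getElem _ _ (by simpa using h)]
  simp

theorem pvInner (G : List (List Int)) (hG : ∀ r ∈ G, r.length = G.length) (i : Nat)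
    (h : i < G.length) :
    (List.range (G.getD i []).length).foldl
      (fun row j => row.set j
        (PySem.Int.mod ((G.getD i []).getD j 0 + ((idxB G.length).getD i []).getD j 0) 2))
      ((idxB G.length).getD i [])
    = xorv (G.getD i []) ((idxB G.length).getD i []) := by
  have hmem : G.getD i [] ∈ G := by
    rw [List.getD_eq_getElem G [] h]; exact List.getElem_mem h
  have hg : (G.getD i []).length = G.length := hG _ hmem
  have hrow : ((idxB G.length).getD i []).length = G.length := by
    rw [pvIdxBRow _ _ h]; simp
  rw [show List.range (G.getD i []).length
      = List.range ((idxB G.length).getD i []).length by rw [hg, hrow]]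
  rw [pvFoldlSetConst
    (fun j => PySem.Int.mod ((G.getD i []).getD j 0 + ((idxB G.length).getD i []).getD j 0) 2)
    (0 : Int) ((idxB G.length).getD i []) _ le_rfl]
  apply List.ext_getElem
  · simp only [List.length_map, List.length_range, pvXorvLen]
    rw [hg, hrow]
    simp
  · intro j h1 h2
    simp only [List.length_map, List.length_range] at h1
    simp only [List.getElem_map, List.getElem_range, if_pos h1]
    rw [pvXorvLen] at h2
    simp only [xorv, List.getElem_map, List.getElem_zip]
    rw [List.getD_eq_getElem _ 0 (by omega), List.getD_eq_getElem _ 0 (by omega)]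

theorem pvMatxaddEq (G : List (List Int)) (hG : ∀ r ∈ G, r.length = G.length) :
    matxaddA G (idxA G.length) = (G.zip (idxB G.length)).map fun p => xorv p.1 p.2 := by
  unfold matxaddA
  rw [pvIdxEq]
  have aux : ∀ k, k ≤ G.length →
      (List.range k).foldl
        (fun xy i => xy.set i
          ((List.range (G.getD i []).length).foldl
            (fun row j => row.set j
              (PySem.Int.mod ((G.getD i []).getD j 0 + ((idxB G.length).getD i []).getD j 0) 2))
            (xy.getD i [])))
        (idxB G.length)
      = (List.range G.length).map
          (fun i => if i < k then xorv (G.getD i []) ((idxB G.length).getD i [])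
                    else (idxB G.length).getD i []) := by
    intro k
    induction k with
    | zero =>
      intro _
      apply List.ext_getElem
      · simp [idxB]
      · intro i h1 h2
        simp only [List.range_zero, List.foldl_nil] at h1 ⊢
        simp only [List.getElem_map, List.getElem_range, if_neg (Nat.not_lt_zero _)]
        rw [List.getD_eq_getElem _ [] (by simpa using h1)]
    | succ k ih =>
      intro hk
      rw [List.range_succ, List.foldl_append, ih (by omega)]
      simp only [List.foldl_cons, List.foldl_nil]
      have hread : ((List.range G.length).map
          (fun i => if i < k then xorv (G.getD i []) ((idxB G.length).getD i [])
                    else (idxB G.length).getD i [])).getD k []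
          = (idxB G.length).getD k [] := by
        rw [List.getD_eq_getElem _ _ (by simp; omega)]
        simp
      rw [hread, pvInner G hG k (by omega)]
      apply List.ext_getElem
      · simp
      · intro i h1 h2
        simp only [List.length_set, List.length_map, List.length_range] at h1 h2
        rw [List.getElem_set]
        simp only [List.getElem_map, List.getElem_range]
        by_cases hik : k = i
        · subst hik
          simp
        · simp only [if_neg hik]
          split_ifs <;> first | rfl | omega
  rw [aux G.length le_rfl]
  apply List.ext_getElem
  · simp [idxB]
  · intro i h1 h2
    simp only [List.length_map, List.length_range] at h1
    simp only [List.getElem_map, List.getElem_range, List.getElem_zip, if_pos h1]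
    rw [List.getD_eq_getElem G [] h1, List.getD_eq_getElem _ [] (by simp [idxB]; exact h1)]

theorem pvRepeat5 (a b c d e : List Int) :
    repeatA [a, b, c, d, e] = true ↔
      (a ≠ b ∧ a ≠ c ∧ a ≠ d ∧ a ≠ e ∧ b ≠ c ∧ b ≠ d ∧ b ≠ e ∧ c ≠ d ∧ c ≠ e ∧ d ≠ e) := by
  unfold repeatA
  rw [show ([a, b, c, d, e] : List (List Int)).length = 5 from rfl]
  rw [show List.range 5 = [0, 1, 2, 3, 4] from by decide]
  simp [List.getD]
  tauto

theorem pvColsadd5 (x1 x2 x3 x4 x5 : List Int) (n : Nat) (h1 : x1.length = n)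
    (h2 : x2.length = n) (h3 : x3.length = n) (h4 : x4.length = n) (h5 : x5.length = n) :
    colsaddA [x1, x2, x3, x4, x5] = xorv (xorv (xorv (xorv x1 x2) x3) x4) x5 := by
  unfold colsaddA
  rw [show ([x1, x2, x3, x4, x5] : List (List Int)).length - 1 = 4 from rfl]
  rw [show List.range 4 = [0, 1, 2, 3] from by decide]
  simp only [List.foldl_cons, List.foldl_nil, List.getD]
  norm_num
  rw [pvColaddEq x1 x2 (by omega)]
  rw [pvColaddEq _ x3 (by rw [pvXorvLen]; omega)]
  rw [pvColaddEq _ x4 (by rw [pvXorvLen, pvXorvLen]; omega)]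
  rw [pvColaddEq _ x5 (by rw [pvXorvLen, pvXorvLen, pvXorvLen]; omega)]

theorem pvKeyAbstract (Z S v : List Int) (hZS : S.length = Z.length)
    (hv : S.length = v.length) (hZr : redB Z = Z) :
    xorv S v = Z ↔ redB v = xorv Z S := by
  constructor
  · intro h
    have h2 : xorv Z S = xorv S (xorv S v) := by
      rw [← h]; exact pvXorvComm _ _
    rw [h2, pvCancel S v hv]
  · intro h
    calc xorv S v = xorv S (redB v) := (pvXorvRedR S v).symm
      _ = xorv S (xorv Z S) := by rw [h]
      _ = xorv S (xorv S Z) := by rw [pvXorvComm Z S]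
      _ = redB Z := pvCancel S Z hZS
      _ = Z := hZr

theorem pvFindSomeExt {α β : Type} (f g : α → Option β) :
    ∀ (l : List α), (∀ a ∈ l, f a = g a) → l.findSome? f = l.findSome? g := by
  intro l
  induction l with
  | nil => intro _; rfl
  | cons a t ih =>
    intro h
    simp only [List.findSome?_cons]
    rw [h a (by simp)]
    cases g a with
    | some v => rfl
    | none => exact ih (fun b hb => h b (by simp [hb]))

theorem pvFilterFindSome {α β : Type} (p : α → Bool) (f : α → Option β) :
    ∀ (l : List α),
      (l.filter p).findSome? f = l.findSome? (fun a => if p a then f a else none) := by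
  intro l
  induction l with
  | nil => rfl
  | cons a t ih =>
    by_cases hp : p a
    · simp [hp, List.findSome?_cons, ih]
    · simp [hp, ih]

theorem pvZipMapR {α β : Type} (f : α → β) :
    ∀ (l : List α), l.zip (l.map f) = l.map fun a => (a, f a) := by
  intro l
  induction l with
  | nil => rfl
  | cons a t ih => simp [ih]

theorem pvZipMapL {α β : Type} (f : α → β) :
    ∀ (l : List α), (l.map f).zip l = l.map fun a => (f a, a) := by
  intro l
  induction l with
  | nil => rfl
  | cons a t ih => simp [ih]

theorem pvDIntro (x1 x2 x3 x4 x5 : List Int) (h21 : ¬ x2 = x1)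
    (h31 : ¬(x3 = x1 ∨ x3 = x2)) (h41 : ¬(x4 = x1 ∨ x4 = x2 ∨ x4 = x3))
    (hD2 : x5 ≠ x1 ∧ x5 ≠ x2 ∧ x5 ≠ x3 ∧ x5 ≠ x4) :
    x1 ≠ x2 ∧ x1 ≠ x3 ∧ x1 ≠ x4 ∧ x1 ≠ x5 ∧ x2 ≠ x3 ∧ x2 ≠ x4 ∧ x2 ≠ x5 ∧
      x3 ≠ x4 ∧ x3 ≠ x5 ∧ x4 ≠ x5 := by
  push_neg at h31 h41
  exact ⟨fun h => h21 h.symm, fun h => h31.1 h.symm, fun h => h41.1 h.symm,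
    fun h => hD2.1 h.symm, fun h => h31.2 h.symm, fun h => h41.2.1 h.symm,
    fun h => hD2.2.1 h.symm, fun h => h41.2.2 h.symm, fun h => hD2.2.2.1 h.symm,
    fun h => hD2.2.2.2 h.symm⟩

theorem pvDLast (x1 x2 x3 x4 x5 : List Int)
    (h : x1 ≠ x2 ∧ x1 ≠ x3 ∧ x1 ≠ x4 ∧ x1 ≠ x5 ∧ x2 ≠ x3 ∧ x2 ≠ x4 ∧ x2 ≠ x5 ∧
      x3 ≠ x4 ∧ x3 ≠ x5 ∧ x4 ≠ x5) :
    x5 ≠ x1 ∧ x5 ≠ x2 ∧ x5 ≠ x3 ∧ x5 ≠ x4 :=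
  ⟨Ne.symm h.2.2.2.1, Ne.symm h.2.2.2.2.2.2.1, Ne.symm h.2.2.2.2.2.2.2.2.1,
    Ne.symm h.2.2.2.2.2.2.2.2.2⟩


theorem pvFoldlLenInv {β : Type} (g : List (List Int) → β → List (List Int))
    (h : ∀ r i, (g r i).length = r.length) :
    ∀ (l : List β) (init : List (List Int)), (l.foldl g init).length = init.length := by
  intro l
  induction l with
  | nil => intro init; rfl
  | cons a t ih => intro init; rw [List.foldl_cons, ih, h]

theorem pvMatxaddLen (G : List (List Int)) :
    (matxaddA G (idxA G.length)).length = G.length := by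
  unfold matxaddA
  refine (pvFoldlLenInv _ (fun r i => List.length_set) _ _).trans ?_
  rw [pvIdxEq]
  simp [idxB]

theorem pvPigeonVals5 (X : List (List Int)) (hX : X.length ≤ 3)
    (x1 x2 x3 x4 x5 : List Int) (h1 : x1 ∈ X) (h2 : x2 ∈ X) (h3 : x3 ∈ X)
    (h4 : x4 ∈ X) (h5 : x5 ∈ X) :
    x1 = x2 ∨ x1 = x3 ∨ x1 = x4 ∨ x1 = x5 ∨ x2 = x3 ∨ x2 = x4 ∨ x2 = x5 ∨
      x3 = x4 ∨ x3 = x5 ∨ x4 = x5 := by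
  obtain ⟨k1, hk1, rfl⟩ := List.mem_iff_getElem.mp h1
  obtain ⟨k2, hk2, rfl⟩ := List.mem_iff_getElem.mp h2
  obtain ⟨k3, hk3, rfl⟩ := List.mem_iff_getElem.mp h3
  obtain ⟨k4, hk4, rfl⟩ := List.mem_iff_getElem.mp h4
  obtain ⟨k5, hk5, rfl⟩ := List.mem_iff_getElem.mp h5
  have hd : k1 = k2 ∨ k1 = k3 ∨ k1 = k4 ∨ k1 = k5 ∨ k2 = k3 ∨ k2 = k4 ∨ k2 = k5 ∨
      k3 = k4 ∨ k3 = k5 ∨ k4 = k5 := by omega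
  rcases hd with h | h | h | h | h | h | h | h | h | h
  · exact Or.inl (by simp [h])
  · exact Or.inr (Or.inl (by simp [h]))
  · exact Or.inr (Or.inr (Or.inl (by simp [h])))
  · exact Or.inr (Or.inr (Or.inr (Or.inl (by simp [h]))))
  · exact Or.inr (Or.inr (Or.inr (Or.inr (Or.inl (by simp [h])))))
  · exact Or.inr (Or.inr (Or.inr (Or.inr (Or.inr (Or.inl (by simp [h]))))))
  · exact Or.inr (Or.inr (Or.inr (Or.inr (Or.inr (Or.inr (Or.inl (by simp [h])))))))
  · exact Or.inr (Or.inr (Or.inr (Or.inr (Or.inr (Or.inr (Or.inr (Or.inl (by simp [h]))))))))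
  · exact Or.inr (Or.inr (Or.inr (Or.inr (Or.inr (Or.inr (Or.inr (Or.inr (Or.inl (by simp [h])))))))))
  · exact Or.inr (Or.inr (Or.inr (Or.inr (Or.inr (Or.inr (Or.inr (Or.inr (Or.inr (by simp [h])))))))))

theorem pvPigeonVals4 (X : List (List Int)) (hX : X.length ≤ 3)
    (x1 x2 x3 x4 : List Int) (h1 : x1 ∈ X) (h2 : x2 ∈ X) (h3 : x3 ∈ X) (h4 : x4 ∈ X) :
    x1 = x2 ∨ x1 = x3 ∨ x1 = x4 ∨ x2 = x3 ∨ x2 = x4 ∨ x3 = x4 := by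
  obtain ⟨k1, hk1, rfl⟩ := List.mem_iff_getElem.mp h1
  obtain ⟨k2, hk2, rfl⟩ := List.mem_iff_getElem.mp h2
  obtain ⟨k3, hk3, rfl⟩ := List.mem_iff_getElem.mp h3
  obtain ⟨k4, hk4, rfl⟩ := List.mem_iff_getElem.mp h4
  have hd : k1 = k2 ∨ k1 = k3 ∨ k1 = k4 ∨ k2 = k3 ∨ k2 = k4 ∨ k3 = k4 := by omega
  rcases hd with h | h | h | h | h | h
  · exact Or.inl (by simp [h])
  · exact Or.inr (Or.inl (by simp [h]))
  · exact Or.inr (Or.inr (Or.inl (by simp [h])))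
  · exact Or.inr (Or.inr (Or.inr (Or.inl (by simp [h]))))
  · exact Or.inr (Or.inr (Or.inr (Or.inr (Or.inl (by simp [h])))))
  · exact Or.inr (Or.inr (Or.inr (Or.inr (Or.inr (by simp [h])))))

theorem pvRepDup (x1 x2 x3 x4 x5 : List Int)
    (h : x1 = x2 ∨ x1 = x3 ∨ x1 = x4 ∨ x1 = x5 ∨ x2 = x3 ∨ x2 = x4 ∨ x2 = x5 ∨
      x3 = x4 ∨ x3 = x5 ∨ x4 = x5) :
    ¬(repeatA [x1, x2, x3, x4, x5] = true) := by
  intro hr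
  have hd := (pvRepeat5 x1 x2 x3 x4 x5).mp hr
  rcases h with h | h | h | h | h | h | h | h | h | h
  · exact hd.1 h
  · exact hd.2.1 h
  · exact hd.2.2.1 h
  · exact hd.2.2.2.1 h
  · exact hd.2.2.2.2.1 h
  · exact hd.2.2.2.2.2.1 h
  · exact hd.2.2.2.2.2.2.1 h
  · exact hd.2.2.2.2.2.2.2.1 h
  · exact hd.2.2.2.2.2.2.2.2.1 h
  · exact hd.2.2.2.2.2.2.2.2.2 h

-- when len(G) ≤ 1, neither program can pick 5 (resp. 4) pairwise-distinct rows out of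
-- the at most 3 rows of X, so both return none
theorem pvSmallCase (G : List (List Int)) (x : List Int) (y : List Int)
    (hn1 : G.length ≤ 1) : ed5 G x y = ed5_alt G x y := by
  simp only [ed5, ed5_alt]
  have hXAlen : (G ++ idxA G.length ++ matxaddA G (idxA G.length)).length ≤ 3 := by
    simp only [List.length_append, pvMatxaddLen]
    rw [pvIdxEq]
    simp [idxB]
    omega
  have hA : (G ++ idxA G.length ++ matxaddA G (idxA G.length)).findSome? (fun x1 =>
      (G ++ idxA G.length ++ matxaddA G (idxA G.length)).findSome? fun x2 =>
      (G ++ idxA G.length ++ matxaddA G (idxA G.length)).findSome? fun x3 =>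
      (G ++ idxA G.length ++ matxaddA G (idxA G.length)).findSome? fun x4 =>
      (G ++ idxA G.length ++ matxaddA G (idxA G.length)).findSome? fun x5 =>
        if repeatA [x1, x2, x3, x4, x5] = true then
          (if colsaddA [x1, x2, x3, x4, x5] = coladdA x y then
            some [x1, x2, x3, x4, x5] else none)
        else none) = none := by
    rw [List.findSome?_eq_none_iff]
    intro x1 h1
    rw [List.findSome?_eq_none_iff]
    intro x2 h2
    rw [List.findSome?_eq_none_iff]
    intro x3 h3
    rw [List.findSome?_eq_none_iff]
    intro x4 h4
    rw [List.findSome?_eq_none_iff]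
    intro x5 h5
    split_ifs with hr hc
    · exact absurd hr (pvRepDup x1 x2 x3 x4 x5
        (pvPigeonVals5 _ hXAlen x1 x2 x3 x4 x5 h1 h2 h3 h4 h5))
    · rfl
    · rfl
  rw [hA]
  by_cases hZB : (xorv x y).length ≠ G.length
  · rw [if_pos hZB]
  · rw [if_neg hZB]
    have hXBlen : (G ++ idxB G.length ++
        ((G.zip (idxB G.length)).map fun p => xorv p.1 p.2)).length ≤ 3 := by
      simp [idxB]
      omega
    symm
    rw [pvZipMapR redB (G ++ idxB G.length ++
      ((G.zip (idxB G.length)).map fun p => xorv p.1 p.2))]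
    simp only [List.findSome?_map, Function.comp_def]
    rw [List.findSome?_eq_none_iff]
    intro x1 h1
    rw [List.findSome?_eq_none_iff]
    intro x2 h2
    by_cases h21 : x2 = x1
    · rw [if_pos h21]
    · rw [if_neg h21]
      rw [List.findSome?_eq_none_iff]
      intro x3 h3
      by_cases h31 : x3 = x1 ∨ x3 = x2
      · rw [if_pos h31]
      · rw [if_neg h31]
        rw [List.findSome?_eq_none_iff]
        intro x4 h4
        by_cases h41 : x4 = x1 ∨ x4 = x2 ∨ x4 = x3
        · rw [if_pos h41]
        · exfalso
          have hd := pvPigeonVals4 _ hXBlen x1 x2 x3 x4 h1 h2 h3 h4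
          rcases hd with h | h | h | h | h | h
          · exact h21 h.symm
          · exact h31 (Or.inl h.symm)
          · exact h41 (Or.inl h.symm)
          · exact h31 (Or.inr h.symm)
          · exact h41 (Or.inr (Or.inl h.symm))
          · exact h41 (Or.inr (Or.inr h.symm))

theorem ed5_main (G : List (List Int)) (x : List Int) (y : List Int)
    (hsq : G.length ≤ 1 ∨ ∀ r ∈ G, r.length = G.length) (hxy : x.length ≤ y.length) :
    ed5 G x y = ed5_alt G x y := by
  by_cases hG : ∀ r ∈ G, r.length = G.length
  case neg =>
    have hn1 : G.length ≤ 1 := by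
      rcases hsq with h | h
      · exact h
      · exact absurd h hG
    exact pvSmallCase G x y hn1
  have hXA : G ++ idxA G.length ++ matxaddA G (idxA G.length)
      = G ++ idxB G.length ++ ((G.zip (idxB G.length)).map fun p => xorv p.1 p.2) := by
    rw [pvMatxaddEq G hG, pvIdxEq]
  simp only [ed5, ed5_alt]
  rw [pvColaddEq x y hxy, hXA]
  set X := G ++ idxB G.length ++ ((G.zip (idxB G.length)).map fun p => xorv p.1 p.2)
    with hXdef
  have hXlen : ∀ r ∈ X, r.length = G.length := by
    intro r hr
    rw [hXdef] at hr
    simp only [List.mem_append] at hr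
    rcases hr with (hr | hr) | hr
    · exact hG r hr
    · unfold idxB at hr
      obtain ⟨i, hi, rfl⟩ := List.mem_map.mp hr
      simp
    · obtain ⟨p, hp, rfl⟩ := List.mem_map.mp hr
      obtain ⟨a, b⟩ := p
      have hab := List.of_mem_zip hp
      rw [pvXorvLen]
      have h1 : a.length = G.length := hG _ hab.1
      have h2 : b.length = G.length := by
        have := hab.2
        unfold idxB at this
        obtain ⟨i, hi, rfl⟩ := List.mem_map.mp this
        simp
      simp [h1, h2]
  have hbuck : ∀ t : List Int,
      (((X.map redB).zip X).foldl (fun d p => d.modify p.1 [] (· ++ [p.2]))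
        (PySem.Dict.empty : PySem.Dict (List Int) (List (List Int)))).getD t []
      = X.filter (fun r => redB r == t) := by
    intro t
    rw [pvZipMapL redB X, PySem.Dict.getD_foldl_modify_append]
    simp [List.filter_map, List.map_map, Function.comp_def]
  by_cases hZn : (xorv x y).length = G.length
  · rw [if_neg (by simp [hZn])]
    rw [pvZipMapR redB X]
    simp only [List.findSome?_map, Function.comp_def]
    apply pvFindSomeExt
    intro x1 hx1
    dsimp only
    apply pvFindSomeExt
    intro x2 hx2
    dsimp only
    by_cases h21 : x2 = x1
    · rw [if_pos h21]
      rw [List.findSome?_eq_none_iff]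
      intro x3 _
      rw [List.findSome?_eq_none_iff]
      intro x4 _
      rw [List.findSome?_eq_none_iff]
      intro x5 _
      split_ifs with h1 h2
      · exact absurd rfl (h21 ▸ ((pvRepeat5 x1 x2 x3 x4 x5).mp h1).1.symm)
      · rfl
      · rfl
    · rw [if_neg h21]
      apply pvFindSomeExt
      intro x3 hx3
      dsimp only
      by_cases h31 : x3 = x1 ∨ x3 = x2
      · rw [if_pos h31]
        rw [List.findSome?_eq_none_iff]
        intro x4 _
        rw [List.findSome?_eq_none_iff]
        intro x5 _
        split_ifs with h1 h2
        · exfalso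
          have hd := (pvRepeat5 x1 x2 x3 x4 x5).mp h1
          rcases h31 with h | h
          · exact hd.2.1 h.symm
          · exact hd.2.2.2.2.1 h.symm
        · rfl
        · rfl
      · rw [if_neg h31]
        apply pvFindSomeExt
        intro x4 hx4
        dsimp only
        by_cases h41 : x4 = x1 ∨ x4 = x2 ∨ x4 = x3
        · rw [if_pos h41]
          rw [List.findSome?_eq_none_iff]
          intro x5 _
          split_ifs with h1 h2
          · exfalso
            have hd := (pvRepeat5 x1 x2 x3 x4 x5).mp h1
            rcases h41 with h | h | h
            · exact hd.2.2.1 h.symm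
            · exact hd.2.2.2.2.2.1 h.symm
            · exact hd.2.2.2.2.2.2.2.1 h.symm
          · rfl
          · rfl
        · rw [if_neg h41]
          rw [hbuck, pvFilterFindSome]
          apply pvFindSomeExt
          intro x5 hx5
          dsimp only
          rw [pvColsadd5 x1 x2 x3 x4 x5 G.length (hXlen _ hx1) (hXlen _ hx2)
            (hXlen _ hx3) (hXlen _ hx4) (hXlen _ hx5)]
          have hS : (xorv (xorv (xorv x1 x2) x3) x4).length = (xorv x y).length := by
            simp [pvXorvLen, hXlen _ hx1, hXlen _ hx2, hXlen _ hx3, hXlen _ hx4, hZn]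
          have hv : (xorv (xorv (xorv x1 x2) x3) x4).length = x5.length := by
            simp [pvXorvLen, hXlen _ hx1, hXlen _ hx2, hXlen _ hx3, hXlen _ hx4,
              hXlen _ hx5]
          have hR : xorv (xorv (xorv (xorv (xorv x y) (redB x1)) (redB x2)) (redB x3))
              (redB x4)
              = xorv (xorv x y) (xorv (xorv (xorv x1 x2) x3) x4) := by
            rw [pvXorvRedR, pvXorvRedR, pvXorvRedR, pvXorvRedR]
            simp only [pvXorvAssoc]
          have hkey := pvKeyAbstract (xorv x y) (xorv (xorv (xorv x1 x2) x3) x4) x5 hS hv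
            (pvRedXorv x y)
          rw [hR]
          simp only [beq_iff_eq, hkey]
          by_cases hK : redB x5 = xorv (xorv x y) (xorv (xorv (xorv x1 x2) x3) x4)
          · by_cases hD2 : x5 ≠ x1 ∧ x5 ≠ x2 ∧ x5 ≠ x3 ∧ x5 ≠ x4
            · rw [if_pos ((pvRepeat5 x1 x2 x3 x4 x5).mpr
                  (pvDIntro x1 x2 x3 x4 x5 h21 h31 h41 hD2)), if_pos hK,
                if_pos hK, if_pos hD2]
            · rw [if_neg (fun hc => hD2
                  (pvDLast x1 x2 x3 x4 x5 ((pvRepeat5 x1 x2 x3 x4 x5).mp hc))),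
                if_pos hK, if_neg hD2]
          · rw [if_neg hK, if_neg hK, ite_self]
  · rw [if_pos hZn]
    rw [List.findSome?_eq_none_iff]
    intro x1 hx1
    rw [List.findSome?_eq_none_iff]
    intro x2 hx2
    rw [List.findSome?_eq_none_iff]
    intro x3 hx3
    rw [List.findSome?_eq_none_iff]
    intro x4 hx4
    rw [List.findSome?_eq_none_iff]
    intro x5 hx5
    split_ifs with h1 h2
    · exfalso
      rw [pvColsadd5 x1 x2 x3 x4 x5 G.length (hXlen _ hx1) (hXlen _ hx2)
        (hXlen _ hx3) (hXlen _ hx4) (hXlen _ hx5)] at h2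
      have := congrArg List.length h2
      rw [pvXorvLen, pvXorvLen, pvXorvLen, pvXorvLen] at this
      rw [hXlen _ hx1, hXlen _ hx2, hXlen _ hx3, hXlen _ hx4, hXlen _ hx5] at this
      simp at this
      exact hZn this.symm
    · rfl
    · rfl

-- ===== VERDICT (by name: the statement is the Claim_ definition above) =====
theorem ed5_spec : Claim_equal_ed5 := by
  intro G x y _ hpre
  exact ed5_main G x y hpre.2.1 hpre.2.2
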